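-- pv_equiv track=rewrite | github.com/oripridan-dot/tooloo-engram | engram_v2/ast_decomposer.py | _strip_docstring
-- ===== SOURCE A (Python) =====
-- def _strip_docstring(lines: list[str]) -> str:
--     """Remove docstring from function/class body for token efficiency."""
--     "\n".join(lines)
--     # Remove triple-quoted docstrings
--     in_docstring = False
--     clean: list[str] = []
--     for line in lines:
--         stripped = line.strip()
--         if not in_docstring and (stripped.startswith('"""') or stripped.startswith("'''")):
--             quote = stripped[:3]
--             if stripped.count(quote) >= 2 and len(stripped) > 3:
--                 continue  # Single-line docstring
--             in_docstring = True
--             continue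
--         if in_docstring:
--             if '"""' in stripped or "'''" in stripped:
--                 in_docstring = False
--             continue
--         clean.append(line)
--     return "\n".join(clean)
-- ===== SOURCE B (Python) =====
-- def _opener(line: str) -> bool:
--     s = line.strip()
--     return s.startswith('"""') or s.startswith("'''")
--
--
-- def _closer(line: str) -> bool:
--     s = line.strip()
--     return '"""' in s or "'''" in s
--
--
-- def _strip_docstring(lines: list[str]) -> str:
--     def blocks(rest: list[str]) -> list[str]:
--         k = 0
--         while k < len(rest) and not _opener(rest[k]):
--             k += 1
--         pre = rest[:k]
--         if k == len(rest):
--             return pre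
--         s = rest[k].strip()
--         if s.count(s[:3]) >= 2 and len(s) > 3:
--             return pre + blocks(rest[k + 1:])  # single-line docstring
--         body = rest[k + 1:]
--         m = 0
--         while m < len(body) and not _closer(body[m]):
--             m += 1
--         return pre + blocks(body[m + 1:])  # past the closing line (or end)
--     return "\n".join(blocks(lines))
-- ===== Notes on version B (the rewrite author's own statement) =====
-- stated objective: alternative
-- what changed: Replaces A's per-line boolean state machine (one fold threading an in_docstring flag and appending line by line) with a recursive block decomposition that copies each maximal opener-free prefix wholesale via a scan-and-slice, then slices past the docstring (single-line, or up to and including its closing line) and recurses on the remainder.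
import Mathlib
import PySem

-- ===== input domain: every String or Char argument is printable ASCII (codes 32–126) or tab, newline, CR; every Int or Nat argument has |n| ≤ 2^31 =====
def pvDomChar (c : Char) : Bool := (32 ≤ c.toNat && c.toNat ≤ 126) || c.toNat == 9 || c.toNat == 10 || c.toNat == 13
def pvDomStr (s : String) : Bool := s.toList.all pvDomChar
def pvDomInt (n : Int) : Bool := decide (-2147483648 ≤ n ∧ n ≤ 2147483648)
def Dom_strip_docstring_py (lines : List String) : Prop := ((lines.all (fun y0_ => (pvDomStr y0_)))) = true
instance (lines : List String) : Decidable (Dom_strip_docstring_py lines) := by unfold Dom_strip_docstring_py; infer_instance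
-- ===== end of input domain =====

-- B replaces A's per-line in_docstring state machine by a recursive block decomposition
-- (copy the maximal opener-free prefix wholesale, slice past the docstring, recurse);
-- objective: alternative.

-- ===== PORT A =====
-- state: (in_docstring, clean); one fold step per line, as in A's single for-loop
def pvStepA (st : Bool × List String) (line : String) : Bool × List String :=
  let stripped := PySem.Str.strip line
  if !st.1 && (PySem.Str.startswith stripped "\"\"\"" || PySem.Str.startswith stripped "'''") then
    let quote := PySem.Str.slice stripped none (some 3)
    if 2 ≤ PySem.Str.count stripped quote ∧ 3 < PySem.Str.len stripped then
      st  -- single-line docstring: continue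
    else
      (true, st.2)  -- in_docstring = True; continue
  else if st.1 then
    (if PySem.Str.isIn "\"\"\"" stripped || PySem.Str.isIn "'''" stripped then false else true, st.2)
  else
    (st.1, st.2 ++ [line])

def strip_docstring_py (lines : List String) : String :=
  PySem.Str.join "\n" (lines.foldl pvStepA (false, [])).2

-- ===== PORT B =====
-- Source B's `_opener`
def pvOpener (line : String) : Bool :=
  let s := PySem.Str.strip line
  PySem.Str.startswith s "\"\"\"" || PySem.Str.startswith s "'''"

-- Source B's `_closer`
def pvCloser (line : String) : Bool :=
  let s := PySem.Str.strip line
  PySem.Str.isIn "\"\"\"" s || PySem.Str.isIn "'''" s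

-- Source B's single-line-docstring test `s.count(s[:3]) >= 2 and len(s) > 3`
def pvSingle (s : String) : Bool :=
  decide (2 ≤ PySem.Str.count s (PySem.Str.slice s none (some 3)) ∧ 3 < PySem.Str.len s)

-- Source B's `blocks`: its k-scan and slices `rest[:k]` / `rest[k:]` are takeWhile/dropWhile on
-- ¬opener (k is the first opener index), `rest[k]` is `suf.head`, and the m-scan on `body`
-- is dropWhile on ¬closer followed by dropping the closing line.
def pvBlocks (rest : List String) : List String :=
  let pre := rest.takeWhile (fun l => !pvOpener l)
  let suf := rest.dropWhile (fun l => !pvOpener l)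
  if hs : suf = [] then pre
  else
    let s := PySem.Str.strip (suf.head hs)
    if pvSingle s then
      pre ++ pvBlocks suf.tail  -- single-line docstring
    else
      pre ++ pvBlocks ((suf.tail.dropWhile (fun l => !pvCloser l)).drop 1)  -- past the closer
termination_by rest.length
decreasing_by
  all_goals
    have h1 : (List.dropWhile (fun l => !pvOpener l) rest).length ≤ rest.length :=
      List.length_dropWhile_le _ _
    have h0 : 0 < (List.dropWhile (fun l => !pvOpener l) rest).length :=
      List.length_pos_of_ne_nil hs
    have h2 : (List.dropWhile (fun l => !pvOpener l) rest).tail.length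
        = (List.dropWhile (fun l => !pvOpener l) rest).length - 1 := List.length_tail
  · omega
  · have h3 : ((List.dropWhile (fun l => !pvOpener l) rest).tail.dropWhile
        (fun l => !pvCloser l)).length ≤ (List.dropWhile (fun l => !pvOpener l) rest).tail.length :=
      List.length_dropWhile_le _ _
    simp only [List.length_drop]
    omega

def strip_docstring_py_alt (lines : List String) : String :=
  PySem.Str.join "\n" (pvBlocks lines)

-- ===== PRECONDITION & SPEC =====
def Spec_strip_docstring_py (lines : List String) (out : String) : Prop := out = strip_docstring_py_alt lines
instance (lines : List String) (out : String) : Decidable (Spec_strip_docstring_py lines out) := by unfold Spec_strip_docstring_py; infer_instance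

-- ===== CLAIM (what is proved, stated in full; the proofs are below) =====
def Claim_equal_strip_docstring_py : Prop := ∀ (lines : List String), Dom_strip_docstring_py lines → Spec_strip_docstring_py lines (strip_docstring_py lines)

-- ===== LEMMAS AND PROOFS =====

theorem pvBlocks_nil : pvBlocks [] = [] := by
  rw [pvBlocks]; rfl

theorem pvBlocks_cons_keep (l : String) (t : List String) (h : pvOpener l = false) :
    pvBlocks (l :: t) = l :: pvBlocks t := by
  conv_lhs => rw [pvBlocks]
  conv_rhs => rw [pvBlocks]
  simp only [List.takeWhile_cons, List.dropWhile_cons, h, Bool.not_false, if_pos trivial,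
    List.cons_append]
  by_cases hs : List.dropWhile (fun l => !pvOpener l) t = []
  · simp only [dif_pos hs]
  · simp only [dif_neg hs]
    split <;> rfl

theorem pvBlocks_cons_open (l : String) (t : List String) (h : pvOpener l = true) :
    pvBlocks (l :: t) =
      (if pvSingle (PySem.Str.strip l) then
        pvBlocks t
      else
        pvBlocks ((t.dropWhile (fun l => !pvCloser l)).drop 1)) := by
  conv_lhs => rw [pvBlocks]
  simp only [List.takeWhile_cons, List.dropWhile_cons, h, Bool.not_true, Bool.false_eq_true,
    if_false, reduceCtorEq, dif_neg, not_false_iff, List.head_cons, List.tail_cons,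
    List.nil_append]

-- A's fold from flag=false computes pvBlocks; from flag=true it computes pvBlocks past the closer.
theorem pv_key : ∀ (n : Nat) (lines : List String) (acc : List String), lines.length ≤ n →
    (lines.foldl pvStepA (false, acc)).2 = acc ++ pvBlocks lines ∧
    (lines.foldl pvStepA (true, acc)).2
      = acc ++ pvBlocks ((lines.dropWhile (fun l => !pvCloser l)).drop 1) := by
  intro n
  induction n with
  | zero =>
    intro lines acc h
    have : lines = [] := List.eq_nil_of_length_eq_zero (Nat.le_zero.mp h)
    subst this
    simp [pvBlocks_nil]
  | succ n ih =>
    intro lines acc h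
    cases lines with
    | nil => simp [pvBlocks_nil]
    | cons l rest =>
      have hr : rest.length ≤ n := by simpa using h
      constructor
      · rw [List.foldl_cons]
        by_cases hop : pvOpener l = true
        · have hsw : (PySem.Str.startswith (PySem.Str.strip l) "\"\"\"" ||
              PySem.Str.startswith (PySem.Str.strip l) "'''") = true := by
            simpa [pvOpener] using hop
          rw [pvBlocks_cons_open l rest hop]
          by_cases hsg : 2 ≤ PySem.Str.count (PySem.Str.strip l)
              (PySem.Str.slice (PySem.Str.strip l) none (some 3)) ∧
              3 < PySem.Str.len (PySem.Str.strip l)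
          · have hps : pvSingle (PySem.Str.strip l) = true := by
              unfold pvSingle; exact decide_eq_true hsg
            simp only [pvStepA, hsw, hsg, hps, Bool.not_false, Bool.true_and, if_pos]
            exact (ih rest acc hr).1
          · have hps : pvSingle (PySem.Str.strip l) = false := by
              unfold pvSingle; exact decide_eq_false hsg
            simp only [pvStepA, hsw, hsg, hps, Bool.not_false, Bool.true_and, if_pos,
              Bool.false_eq_true, if_false]
            exact (ih rest acc hr).2
        · have hop' : pvOpener l = false := by simpa using hop
          have hsw : (PySem.Str.startswith (PySem.Str.strip l) "\"\"\"" ||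
              PySem.Str.startswith (PySem.Str.strip l) "'''") = false := by
            simpa [pvOpener] using hop'
          rw [pvBlocks_cons_keep l rest hop']
          simp only [pvStepA, hsw, Bool.not_false, Bool.true_and, Bool.false_eq_true, if_false]
          rw [(ih rest (acc ++ [l]) hr).1]
          simp
      · rw [List.foldl_cons]
        by_cases hcl : pvCloser l = true
        · have hc : (PySem.Str.isIn "\"\"\"" (PySem.Str.strip l) ||
              PySem.Str.isIn "'''" (PySem.Str.strip l)) = true := by
            simpa [pvCloser] using hcl
          simp only [pvStepA, hc, Bool.not_true, Bool.false_and, Bool.false_eq_true, if_false,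
            if_pos, List.dropWhile_cons, hcl]
          exact (ih rest acc hr).1
        · have hcl' : pvCloser l = false := by simpa using hcl
          have hc : (PySem.Str.isIn "\"\"\"" (PySem.Str.strip l) ||
              PySem.Str.isIn "'''" (PySem.Str.strip l)) = false := by
            simpa [pvCloser] using hcl'
          simp only [pvStepA, hc, Bool.not_true, Bool.false_and, Bool.false_eq_true, if_false,
            List.dropWhile_cons, hcl', Bool.not_false, if_true]
          exact (ih rest acc hr).2

-- ===== VERDICT (by name: the statement is the Claim_ definition above) =====
theorem strip_docstring_py_spec : Claim_equal_strip_docstring_py := by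
  intro lines _
  show strip_docstring_py lines = strip_docstring_py_alt lines
  unfold strip_docstring_py strip_docstring_py_alt
  rw [(pv_key lines.length lines [] le_rfl).1]
  simp
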